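-- pv_equiv track=rewrite | github.com/miramastoras/DeepPolisher_manuscript | scripts/annotate_vcf_by_seq_context.py | extend_dimers
-- ===== SOURCE A (Python) =====
-- def extend_dimers(reference_sequence, pattern, start_index):
--     '''
--     :param reference_sequence: string containing genome sequence
--     :param pattern: dimer pattern to search for "at gc ct ag"
--     :param start_index: start index in sequence
--     :return: end index in sequence for end of repeat pattern
--     '''
--     end_index = start_index + 2
--     while end_index < len(reference_sequence) - 1:
--         di_mer = reference_sequence[end_index] + reference_sequence[end_index + 1]
--         if di_mer == pattern:
--             end_index += 2
--         else:
--             break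
--
--     return end_index
-- ===== SOURCE B (Python) =====
-- def extend_dimers(reference_sequence, pattern, start_index):
--     '''
--     :param reference_sequence: string containing genome sequence
--     :param pattern: dimer pattern to search for "at gc ct ag"
--     :param start_index: start index in sequence
--     :return: end index in sequence for end of repeat pattern
--     '''
--     base = start_index + 2
--     if len(pattern) != 2:
--         # a 2-character window can never equal a pattern of another length
--         return base
--     window = reference_sequence[base:]
--     reps = pattern * (len(window) // 2)
--     cp = 0
--     for c, p in zip(window, reps):
--         if c != p:
--             break
--         cp += 1
--     # a half-matched chunk does not count: round down to whole dimers
--     return base + 2 * (cp // 2)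
-- ===== Notes on version B (the rewrite author's own statement) =====
-- stated objective: alternative
-- what changed: Instead of A's stepwise while-loop that re-reads two characters per iteration, B materialises the ideal repetition pattern*(len(window)//2), takes the longest common prefix of the suffix window with it, and rounds the prefix length down to whole dimers.
-- outside the precondition, e.g. on extend_dimers('abab', 'ab', -4): A returns 4, B returns 0; on extend_dimers('ab', 'ab', -10): A raises IndexError, B returns -6
import Mathlib
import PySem

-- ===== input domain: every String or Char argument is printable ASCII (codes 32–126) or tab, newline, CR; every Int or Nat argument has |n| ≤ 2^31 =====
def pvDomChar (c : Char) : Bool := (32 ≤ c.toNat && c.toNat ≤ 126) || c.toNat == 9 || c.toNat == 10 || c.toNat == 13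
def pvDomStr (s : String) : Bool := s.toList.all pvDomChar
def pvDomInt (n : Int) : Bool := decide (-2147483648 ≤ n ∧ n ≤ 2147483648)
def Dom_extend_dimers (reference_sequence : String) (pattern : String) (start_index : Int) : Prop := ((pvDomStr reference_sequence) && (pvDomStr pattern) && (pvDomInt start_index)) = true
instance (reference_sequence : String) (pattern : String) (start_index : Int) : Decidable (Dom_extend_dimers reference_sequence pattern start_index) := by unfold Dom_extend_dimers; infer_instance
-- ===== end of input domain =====

-- B replaces A's stepwise two-character while-loop by comparing the suffix window with a
-- materialised repetition of the pattern and rounding the common-prefix length down to whole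
-- dimers (objective: alternative decomposition, same cost).

-- ===== PORT A =====
-- the while loop of A: end_index advances by 2 while the next two characters equal pattern
def extendLoopA (s : List Char) (pattern : String) (e : Int) : Int :=
  if h : e < (s.length : Int) - 1 then
    match PySem.List.pyGet? s e, PySem.List.pyGet? s (e + 1) with
    | some c1, some c2 =>
        if String.ofList [c1, c2] = pattern then extendLoopA s pattern (e + 2) else e
    | _, _ => e   -- Python raises IndexError here (negative e below -len); outside Pre_
  else e
termination_by ((s.length : Int) - 1 - e).toNat
decreasing_by omega

def extend_dimers (reference_sequence : String) (pattern : String) (start_index : Int) : Int :=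
  extendLoopA reference_sequence.toList pattern (start_index + 2)

-- ===== PORT B =====
-- pattern * m
def pyMulList (p : List Char) : Nat → List Char
  | 0 => []
  | n + 1 => p ++ pyMulList p n

-- the for-loop of B: count leading equal pairs of zip(window, reps), break at first mismatch
def cpLoop : List (Char × Char) → Nat
  | [] => 0
  | (c, p) :: rest => if c ≠ p then 0 else cpLoop rest + 1

def extend_dimers_alt (reference_sequence : String) (pattern : String) (start_index : Int) : Int :=
  let base := start_index + 2
  if pattern.toList.length ≠ 2 then base
  else
    let window := PySem.List.slice reference_sequence.toList (some base) none
    let reps := pyMulList pattern.toList (window.length / 2)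
    let cp := cpLoop (window.zip reps)
    base + 2 * ((cp : Int) / 2)

-- ===== PRECONDITION & SPEC =====
-- Pre_ restricts to the natural domain of non-negative dimer start positions (start_index + 2 ≥ 0);
-- for smaller start_index Python's negative indexing makes A scan a wrapped window (or raise
-- IndexError), an artefact of A's index arithmetic that a suffix-based B does not reproduce.
def Pre_extend_dimers (reference_sequence : String) (pattern : String) (start_index : Int) : Prop :=
  0 ≤ start_index + 2
instance (reference_sequence : String) (pattern : String) (start_index : Int) : Decidable (Pre_extend_dimers reference_sequence pattern start_index) := by unfold Pre_extend_dimers; infer_instance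

def pvWitness_extend_dimers : String × String × Int := ("ababab", "ab", 0)

def Spec_extend_dimers (reference_sequence : String) (pattern : String) (start_index : Int) (out : Int) : Prop := out = extend_dimers_alt reference_sequence pattern start_index
instance (reference_sequence : String) (pattern : String) (start_index : Int) (out : Int) : Decidable (Spec_extend_dimers reference_sequence pattern start_index out) := by unfold Spec_extend_dimers; infer_instance

-- ===== CLAIM (what is proved, stated in full; the proofs are below) =====
def Claim_equal_extend_dimers : Prop := ∀ (reference_sequence : String) (pattern : String) (start_index : Int), Dom_extend_dimers reference_sequence pattern start_index → Pre_extend_dimers reference_sequence pattern start_index → Spec_extend_dimers reference_sequence pattern start_index (extend_dimers reference_sequence pattern start_index)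

-- ===== LEMMAS AND PROOFS =====

-- number of whole leading dimers equal to p (proof-side characterisation shared by both ports)
def chunkRun (p : List Char) : List Char → Nat
  | c1 :: c2 :: rest => if [c1, c2] = p then chunkRun p rest + 1 else 0
  | _ => 0

lemma chunkRun_of_len_ne (p : List Char) (hp : p.length ≠ 2) (w : List Char) :
    chunkRun p w = 0 := by
  match w with
  | [] => rfl
  | [c] => rfl
  | c1 :: c2 :: rest =>
    simp only [chunkRun]
    rw [if_neg]
    intro h
    apply hp
    rw [← h]
    rfl

-- A-side: the loop from a non-negative index computes base + 2 * chunkRun of the suffix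
lemma extendLoopA_eq (s : List Char) (pat : String) (e : Int) (he : 0 ≤ e) :
    extendLoopA s pat e = e + 2 * (chunkRun pat.toList (s.drop e.toNat) : Int) := by
  rw [extendLoopA]
  by_cases h : e < (s.length : Int) - 1
  · rw [dif_pos h]
    have hlt1 : e.toNat < s.length := by omega
    have hlt2 : e.toNat + 1 < s.length := by omega
    have hget1 : PySem.List.pyGet? s e = s[e.toNat]? := PySem.List.pyGet?_of_nonneg _ he
    have hget2 : PySem.List.pyGet? s (e + 1) = s[e.toNat + 1]? := by
      rw [PySem.List.pyGet?_of_nonneg _ (by omega : (0:Int) ≤ e + 1),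
          show (e + 1).toNat = e.toNat + 1 from by omega]
    rw [hget1, hget2, List.getElem?_eq_getElem hlt1, List.getElem?_eq_getElem hlt2]
    have hdrop : s.drop e.toNat = s[e.toNat] :: s[e.toNat + 1] :: s.drop (e.toNat + 2) := by
      rw [List.drop_eq_getElem_cons hlt1, List.drop_eq_getElem_cons (by omega : e.toNat + 1 < s.length)]
    rw [hdrop]
    simp only [chunkRun]
    by_cases hpat : String.ofList [s[e.toNat], s[e.toNat + 1]] = pat
    · rw [if_pos hpat]
      rw [if_pos (show [s[e.toNat], s[e.toNat + 1]] = pat.toList from by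
        rw [← hpat, String.toList_ofList])]
      rw [extendLoopA_eq s pat (e + 2) (by omega)]
      rw [show (e + 2).toNat = e.toNat + 2 from by omega]
      push_cast
      ring
    · rw [if_neg hpat]
      rw [if_neg (by intro hl; exact hpat (by rw [hl, String.ofList_toList]))]
      omega
  · rw [dif_neg h]
    have : chunkRun pat.toList (s.drop e.toNat) = 0 := by
      match hd : s.drop e.toNat with
      | [] => rfl
      | [c] => rfl
      | c1 :: c2 :: rest =>
        exfalso
        have := congrArg List.length hd
        simp [List.length_drop] at this
        omega
    rw [this]
    omega
termination_by ((s.length : Int) - 1 - e).toNat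
decreasing_by omega

-- B-side: the rounded common prefix with the materialised repetition is chunkRun
lemma cp_eq_chunkRun (p : List Char) (hp : p.length = 2) (w : List Char) :
    cpLoop (w.zip (pyMulList p (w.length / 2))) / 2 = chunkRun p w := by
  match p, hp with
  | [p1, p2], _ =>
    match w with
    | [] => simp [cpLoop, chunkRun, pyMulList]
    | [c] => simp [cpLoop, chunkRun, pyMulList]
    | c1 :: c2 :: rest =>
      have hlen : (c1 :: c2 :: rest).length / 2 = rest.length / 2 + 1 := by
        simp [List.length_cons]; omega
      rw [hlen]
      simp only [pyMulList, List.cons_append, List.nil_append, List.zip_cons_cons]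
      by_cases h1 : c1 = p1
      · subst h1
        by_cases h2 : c2 = p2
        · subst h2
          have ih := cp_eq_chunkRun [c1, c2] rfl rest
          simp [cpLoop, chunkRun, ite_not]
          omega
        · simp [cpLoop, chunkRun, ite_not, h2]
      · simp [cpLoop, chunkRun, ite_not, h1]

-- ===== VERDICT (by name: the statement is the Claim_ definition above) =====
theorem extend_dimers_spec : Claim_equal_extend_dimers := by
  intro s pat i _hdom hpre
  unfold Spec_extend_dimers extend_dimers
  simp only [extend_dimers_alt]
  have hbase : (0 : Int) ≤ i + 2 := hpre
  rw [extendLoopA_eq s.toList pat (i + 2) hbase]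
  have hsl : PySem.List.slice s.toList (some (i + 2)) none = s.toList.drop (i + 2).toNat :=
    PySem.List.slice_from _ hbase
  rw [hsl]
  by_cases hp : pat.toList.length ≠ 2
  · rw [if_pos hp, chunkRun_of_len_ne pat.toList hp]
    simp
  · rw [if_neg hp]
    rw [ne_eq, not_not] at hp
    rw [show ((cpLoop ((s.toList.drop (i+2).toNat).zip (pyMulList pat.toList ((s.toList.drop (i+2).toNat).length / 2))) : Int) / 2)
        = ((cpLoop ((s.toList.drop (i+2).toNat).zip (pyMulList pat.toList ((s.toList.drop (i+2).toNat).length / 2))) / 2 : Nat) : Int) from by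
      omega]
    rw [cp_eq_chunkRun pat.toList hp]
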